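-- pv_equiv track=rewrite | github.com/vuminhdiep/CSC483 | Project 1/ngram_lm.py | ngrams
-- ===== SOURCE A (Python) =====
-- def start_pad(c):
--     ''' Returns a padding string of length c to append to the front of text
--         as a pre-processing step to building n-grams. c = n-1 '''
--     return '~' * c
--
-- def ngrams(c, text):
--     ''' Returns the ngrams of the text as tuples where the first element is
--         the length-c context and the second is the char '''
--     ngrams_list = []
--     text = start_pad(c) + text
--     for i in range(len(text) - c):
--         context = text[i : i + c]
--         char = text[i + c]
--         ngrams_list.append((context, char))
--     return ngrams_list
-- ===== SOURCE B (Python) =====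
-- def start_pad(c):
--     ''' Returns a padding string of length c to append to the front of text
--         as a pre-processing step to building n-grams. c = n-1 '''
--     return '~' * c
--
-- def ngrams(c, text):
--     ''' Sliding window: keep the current length-c context and update it
--         incrementally instead of re-slicing the padded text at every index. '''
--     ngrams_list = []
--     context = start_pad(c)
--     for ch in text:
--         ngrams_list.append((context, ch))
--         context = (context + ch)[1:]
--     return ngrams_list
-- ===== Notes on version B (the rewrite author's own statement) =====
-- stated objective: simpler
-- what changed: B never builds the padded string or index ranges: it iterates over the characters once, maintaining the length-c context incrementally as a sliding window, instead of A's re-slicing text[i:i+c] at every index of the padded text.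
-- outside the precondition, e.g. on ngrams(-1, 'ab'): A returns [('a', 'b'), ('', 'a'), ('', 'b')], B returns [('', 'a'), ('', 'b')]
import Mathlib
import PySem

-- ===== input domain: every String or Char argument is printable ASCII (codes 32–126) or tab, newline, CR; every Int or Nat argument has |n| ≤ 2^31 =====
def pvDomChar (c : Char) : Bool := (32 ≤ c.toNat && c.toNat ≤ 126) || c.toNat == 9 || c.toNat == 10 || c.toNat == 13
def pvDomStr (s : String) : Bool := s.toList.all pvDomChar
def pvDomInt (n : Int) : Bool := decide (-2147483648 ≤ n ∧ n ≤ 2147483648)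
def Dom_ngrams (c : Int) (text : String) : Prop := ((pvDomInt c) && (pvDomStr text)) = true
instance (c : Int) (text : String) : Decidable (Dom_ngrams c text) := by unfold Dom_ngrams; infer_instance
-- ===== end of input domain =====

-- B replaces A's index loop with per-slice context extraction by a single pass over the
-- characters that maintains the length-c context incrementally (simpler; return value only).


-- ===== PORT A =====
-- start_pad(c) = '~' * c  (a negative count yields the empty string, as in Python)
def startPad (c : Int) : List Char := List.replicate c.toNat '~'

def ngrams (c : Int) (text : String) : List (String × String) :=
  let t := startPad c ++ text.toList
  (PySem.List.pyRange 0 ((t.length : Int) - c) 1).foldl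
    (fun acc i =>
      let context := PySem.List.slice t (some i) (some (i + c))
      let ch := PySem.List.pyGetD t (i + c) ' '   -- text[i+c]; in range whenever Pre_ holds
      acc ++ [(String.mk context, String.mk [ch])]) []

-- ===== PORT B =====
def ngrams_alt (c : Int) (text : String) : List (String × String) :=
  (text.toList.foldl
    (fun s ch =>
      (s.1 ++ [(String.mk s.2, String.mk [ch])], (s.2 ++ [ch]).tail))  -- (context+ch)[1:]
    ([], startPad c)).1

-- ===== PRECONDITION & SPEC =====
-- Pre_ restricts to the function's natural domain c ≥ 0 (c = n-1 of an n-gram): for c < 0 the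
-- Python A raises IndexError whenever len(text) < |c|, and where it does return, the values come
-- from accidental negative-slice/negative-index arithmetic outside the function's purpose.
def Pre_ngrams (c : Int) (text : String) : Prop := 0 ≤ c
instance (c : Int) (text : String) : Decidable (Pre_ngrams c text) := by unfold Pre_ngrams; infer_instance

def pvWitness_ngrams : Int × String := (2, "ab")

def Spec_ngrams (c : Int) (text : String) (out : List (String × String)) : Prop := out = ngrams_alt c text
instance (c : Int) (text : String) (out : List (String × String)) : Decidable (Spec_ngrams c text out) := by unfold Spec_ngrams; infer_instance

-- ===== CLAIM (what is proved, stated in full; the proofs are below) =====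
def Claim_equal_ngrams : Prop := ∀ (c : Int) (text : String), Dom_ngrams c text → Pre_ngrams c text → Spec_ngrams c text (ngrams c text)

-- ===== LEMMAS AND PROOFS =====

-- The common sliding-window description both ports are reduced to.
def win : List Char → List Char → List (String × String)
  | _, [] => []
  | ctx, ch :: rest => (String.mk ctx, String.mk [ch]) :: win ((ctx ++ [ch]).tail) rest

theorem bfold_eq_win (l : List Char) (acc : List (String × String)) (ctx : List Char) :
    (l.foldl (fun s ch => (s.1 ++ [(String.mk s.2, String.mk [ch])], (s.2 ++ [ch]).tail)) (acc, ctx)).1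
      = acc ++ win ctx l := by
  induction l generalizing acc ctx with
  | nil => simp [win]
  | cons ch rest ih => simp [win, ih]

theorem amap_eq_win (n : Nat) (rest ctx : List Char) (hctx : ctx.length = n) :
    (List.range rest.length).map
        (fun k => (String.mk (((ctx ++ rest).drop k).take n),
                   String.mk [(ctx ++ rest).getD (k + n) ' ']))
      = win ctx rest := by
  induction rest generalizing ctx with
  | nil => simp [win]
  | cons ch r ih =>
    have hlen : (ch :: r).length = r.length + 1 := rfl
    rw [hlen, List.range_succ_eq_map, List.map_cons, List.map_map]
    have hne : ctx ++ [ch] ≠ [] := by simp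
    have hsplit : ctx ++ ch :: r = (ctx ++ [ch]) ++ r := by simp
    have hhead : (String.mk (((ctx ++ ch :: r).drop 0).take n),
                  String.mk [(ctx ++ ch :: r).getD (0 + n) ' '])
        = (String.mk ctx, String.mk [ch]) := by
      rw [List.drop_zero]
      have t1 : List.take n (ctx ++ ch :: r) = ctx := by
        rw [← hctx]; exact List.take_left ..
      have t2 : (ctx ++ ch :: r).getD (0 + n) ' ' = ch := by
        rw [Nat.zero_add, ← hctx, List.getD, List.getElem?_append_right (le_refl _)]
        simp
      rw [t1, t2]
    have htail :
        ((List.range r.length).map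
          ((fun k => (String.mk (((ctx ++ ch :: r).drop k).take n),
                      String.mk [(ctx ++ ch :: r).getD (k + n) ' '])) ∘ Nat.succ))
        = win ((ctx ++ [ch]).tail) r := by
      have hctx' : ((ctx ++ [ch]).tail).length = n := by simp [hctx]
      rw [← ih ((ctx ++ [ch]).tail) hctx']
      apply List.map_congr_left
      intro k _
      have h1 : (ctx ++ ch :: r).drop (Nat.succ k)
          = (((ctx ++ [ch]).tail) ++ r).drop k := by
        rw [hsplit]
        cases hc : ctx ++ [ch] with
        | nil => exact absurd hc hne
        | cons x xs => simp
      have h2 : (ctx ++ ch :: r).getD (Nat.succ k + n) ' '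
          = (((ctx ++ [ch]).tail) ++ r).getD (k + n) ' ' := by
        rw [hsplit]
        cases hc : ctx ++ [ch] with
        | nil => exact absurd hc hne
        | cons x xs =>
          have hk : Nat.succ k + n = (k + n) + 1 := by omega
          simp [hk, List.getD]
      simp only [Function.comp, h1, h2]
    rw [hhead, htail, win]

theorem ngrams_eq_win (c : Int) (text : String) (hc : 0 ≤ c) :
    ngrams c text = win (startPad c) text.toList := by
  obtain ⟨n, rfl⟩ : ∃ n : Nat, c = (n : Int) := ⟨c.toNat, (Int.toNat_of_nonneg hc).symm⟩
  unfold ngrams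
  have hpad : startPad (n : Int) = List.replicate n '~' := by simp [startPad]
  set t := startPad (n : Int) ++ text.toList with ht
  have hlen : t.length = n + text.toList.length := by simp [ht, hpad]
  have hbound : ((t.length : Int) - (n : Int)) = (text.toList.length : Int) := by
    rw [hlen]; push_cast; ring
  rw [PySem.List.foldl_append_singleton_eq_map, List.nil_append, hbound,
      PySem.List.pyRange_one]
  have : ((text.toList.length : Int) - 0).toNat = text.toList.length := by omega
  rw [this, List.map_map]
  rw [← amap_eq_win n text.toList (startPad (n : Int)) (by simp [hpad]), ← ht]
  apply List.map_congr_left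
  intro k _
  have hz : (0 : Int) + (k : Int) = (k : Int) := by ring
  simp only [Function.comp, hz]
  congr 1
  · congr 1
    exact PySem.List.slice_natCast_add t k n
  · congr 2
    have : (k : Int) + (n : Int) = ((k + n : Nat) : Int) := by push_cast; ring
    rw [this, PySem.List.pyGetD_natCast]

-- ===== VERDICT (by name: the statement is the Claim_ definition above) =====
theorem ngrams_spec : Claim_equal_ngrams := by
  intro c text _ hpre
  unfold Spec_ngrams ngrams_alt
  rw [ngrams_eq_win c text hpre, bfold_eq_win, List.nil_append]
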